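-- pv_equiv track=rewrite | github.com/jintanabp/allocation_target | backend/fabric_dax_connector.py | _dax_date_filter
-- ===== SOURCE A (Python) =====
-- def _dax_date_filter(month_year_list: list[tuple[int, int]]) -> str:
--     by_year: dict[int, list[int]] = {}
--     for m, y in month_year_list:
--         by_year.setdefault(y, []).append(m)
--     parts = []
--     for y, months in sorted(by_year.items()):
--         ms = sorted(months)
--         if len(ms) == 1:
--             parts.append(f"(YEAR('DimDate'[Date]) = {y} && MONTH('DimDate'[Date]) = {ms[0]})")
--         else:
--             m_str = ", ".join(str(x) for x in ms)
--             parts.append(f"(YEAR('DimDate'[Date]) = {y} && MONTH('DimDate'[Date]) IN {{{m_str}}})")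
--     return " || ".join(parts)
-- ===== SOURCE B (Python) =====
-- def _dax_date_filter(month_year_list: list[tuple[int, int]]) -> str:
--     s = sorted(month_year_list, key=lambda t: (t[1], t[0]))
--     parts = []
--     i, n = 0, len(s)
--     while i < n:
--         y = s[i][1]
--         j = i
--         while j < n and s[j][1] == y:
--             j += 1
--         ms = [m for m, _ in s[i:j]]
--         if len(ms) == 1:
--             parts.append(f"(YEAR('DimDate'[Date]) = {y} && MONTH('DimDate'[Date]) = {ms[0]})")
--         else:
--             m_str = ", ".join(str(x) for x in ms)
--             parts.append(f"(YEAR('DimDate'[Date]) = {y} && MONTH('DimDate'[Date]) IN {{{m_str}}})")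
--         i = j
--     return " || ".join(parts)
-- ===== Notes on version B (the rewrite author's own statement) =====
-- stated objective: alternative
-- what changed: Replaces the setdefault-dict grouping plus per-key sorts with one sort by (year, month) followed by a single two-pointer scan over contiguous year runs, maintaining no intermediate mapping.
import Mathlib
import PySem

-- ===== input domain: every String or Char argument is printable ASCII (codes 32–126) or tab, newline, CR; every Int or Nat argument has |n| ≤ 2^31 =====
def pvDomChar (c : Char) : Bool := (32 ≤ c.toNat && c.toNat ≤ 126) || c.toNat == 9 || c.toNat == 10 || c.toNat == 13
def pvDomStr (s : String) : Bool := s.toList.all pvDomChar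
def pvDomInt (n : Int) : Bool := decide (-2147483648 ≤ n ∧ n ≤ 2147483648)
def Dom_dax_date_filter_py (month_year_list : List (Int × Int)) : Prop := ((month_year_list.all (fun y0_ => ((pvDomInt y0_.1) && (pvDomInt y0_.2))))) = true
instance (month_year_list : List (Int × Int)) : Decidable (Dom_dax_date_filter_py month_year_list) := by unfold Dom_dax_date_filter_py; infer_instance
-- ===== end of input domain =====

-- B replaces A's setdefault-dict grouping + per-key sorts by one sort on (year, month)
-- followed by a single scan over contiguous year runs (objective: alternative).


-- shared helper: the f-string both Pythons emit for one (year, months) group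
def pvDaxPart (y : Int) (ms : List Int) : String :=
  if ms.length = 1 then
    "(YEAR('DimDate'[Date]) = " ++ PySem.Int.toStr y ++ " && MONTH('DimDate'[Date]) = "
      ++ PySem.Int.toStr (PySem.List.pyGetD ms 0 0) ++ ")"
  else
    "(YEAR('DimDate'[Date]) = " ++ PySem.Int.toStr y ++ " && MONTH('DimDate'[Date]) IN {"
      ++ PySem.Str.join ", " (ms.map PySem.Int.toStr) ++ "})"

-- ===== PORT A =====
-- sorted(by_year.items()): the dict's keys are distinct, so Python's tuple comparison
-- never reaches the second component; sorting by the year (first component) is exact here.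
def dax_date_filter_py (month_year_list : List (Int × Int)) : String :=
  PySem.Str.join " || "
    ((PySem.List.sorted
        (month_year_list.foldl (fun d p => d.modify p.2 [] (fun ms => ms ++ [p.1]))
          (PySem.Dict.empty : PySem.Dict Int (List Int))).items (fun p => p.1) false).foldl
      (fun parts p => parts ++ [pvDaxPart p.1 (PySem.List.sorted p.2 (fun x => x) false)]) [])

-- ===== PORT B =====
-- the outer while loop of Source B: each step peels one contiguous run of equal years
-- (inner `while j < n and s[j][1] == y` scan + s[i:j] slice = head :: takeWhile, rest = dropWhile)
def pvAltGroups : List (Int × Int) → List String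
  | [] => []
  | (m, y) :: rest =>
    pvDaxPart y (m :: (rest.takeWhile (fun p => p.2 == y)).map (·.1))
      :: pvAltGroups (rest.dropWhile (fun p => p.2 == y))
  termination_by l => l.length
  decreasing_by
    have := List.length_dropWhile_le (fun p : Int × Int => p.2 == y) rest
    simp; omega

def dax_date_filter_py_alt (month_year_list : List (Int × Int)) : String :=
  PySem.Str.join " || "
    (pvAltGroups (PySem.List.sorted2 month_year_list (fun p => p.2) (fun p => p.1) false))

-- ===== PRECONDITION & SPEC =====
def Spec_dax_date_filter_py (month_year_list : List (Int × Int)) (out : String) : Prop := out = dax_date_filter_py_alt month_year_list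
instance (month_year_list : List (Int × Int)) (out : String) : Decidable (Spec_dax_date_filter_py month_year_list out) := by unfold Spec_dax_date_filter_py; infer_instance

-- ===== CLAIM (what is proved, stated in full; the proofs are below) =====
def Claim_equal_dax_date_filter_py : Prop := ∀ (month_year_list : List (Int × Int)), Dom_dax_date_filter_py month_year_list → Spec_dax_date_filter_py month_year_list (dax_date_filter_py month_year_list)

-- ===== LEMMAS AND PROOFS =====

-- the common canonical form both ports are reduced to
def pvCanon (l : List (Int × Int)) : List String :=
  (PySem.List.sorted (PySem.Set.ofList (l.map (·.2))) (fun x => x) false).map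
    (fun y => pvDaxPart y
      (PySem.List.sorted ((l.filter (fun p => p.2 == y)).map (·.1)) (fun x => x) false))

-- lex order Python's key (t[1], t[0]) sorts by
def pvR (a b : Int × Int) : Prop := a.2 < b.2 ∨ (a.2 = b.2 ∧ a.1 ≤ b.1)

theorem pv_keys (l : List (Int × Int)) :
    (l.foldl (fun d p => d.modify p.2 [] (fun ms => ms ++ [p.1]))
      (PySem.Dict.empty : PySem.Dict Int (List Int))).keys
      = PySem.Set.ofList (l.map (·.2)) := by
  have h := PySem.Dict.keys_foldl_modify_key l (fun p => p.2) []
    (fun _ p ms => ms ++ [p.1]) (PySem.Dict.empty : PySem.Dict Int (List Int))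
  simpa [PySem.Dict.keys_empty, PySem.Set.update_nil_left] using h

theorem pv_getD (l : List (Int × Int)) (y : Int) :
    (l.foldl (fun d p => d.modify p.2 [] (fun ms => ms ++ [p.1]))
      (PySem.Dict.empty : PySem.Dict Int (List Int))).getD y []
      = (l.filter (fun p => p.2 == y)).map (·.1) := by
  have h1 : l.foldl (fun d p => d.modify p.2 [] (fun ms => ms ++ [p.1]))
      (PySem.Dict.empty : PySem.Dict Int (List Int))
      = (l.map (fun p => (p.2, p.1))).foldl
          (fun d q => d.modify q.1 [] (fun ms => ms ++ [q.2])) PySem.Dict.empty := by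
    rw [List.foldl_map]
  rw [h1, PySem.Dict.getD_foldl_modify_append, List.filter_map]
  simp [Function.comp_def, List.map_map]

theorem pv_A_canon (l : List (Int × Int)) :
    dax_date_filter_py l = PySem.Str.join " || " (pvCanon l) := by
  unfold dax_date_filter_py
  have hnd : (l.foldl (fun d p => d.modify p.2 [] (fun ms => ms ++ [p.1]))
      (PySem.Dict.empty : PySem.Dict Int (List Int))).keys.Nodup := by
    rw [pv_keys]; exact PySem.Set.nodup_ofList _
  have hitems : (l.foldl (fun d p => d.modify p.2 [] (fun ms => ms ++ [p.1]))
      (PySem.Dict.empty : PySem.Dict Int (List Int))).items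
      = (PySem.Set.ofList (l.map (·.2))).map
          (fun y => (y, (l.filter (fun p => p.2 == y)).map (·.1))) := by
    rw [PySem.Dict.items_eq_map_keys _ hnd [], pv_keys]
    exact List.map_eq_map_iff.mpr (fun y _ => by rw [pv_getD])
  have hsorted : PySem.List.sorted
      (l.foldl (fun d p => d.modify p.2 [] (fun ms => ms ++ [p.1]))
        (PySem.Dict.empty : PySem.Dict Int (List Int))).items (fun p => p.1) false
      = (PySem.List.sorted (PySem.Set.ofList (l.map (·.2))) (fun x => x) false).map
          (fun y => (y, (l.filter (fun p => p.2 == y)).map (·.1))) := by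
    apply PySem.List.sorted_eq_of_perm_of_pairwise_lt
    · rw [hitems]
      exact (PySem.List.sorted_perm _ _ _).map _
    · exact (PySem.List.sorted_ofList_pairwise_lt _).map _ (fun a b h => h)
  rw [hsorted, PySem.List.foldl_append_singleton_eq_map]
  simp [pvCanon, List.map_map, Function.comp_def]

theorem pv_insertBy_pairwise {α : Type} (R : α → α → Prop) (before : α → α → Bool)
    (htrans : ∀ a b c, R a b → R b c → R a c)
    (h1 : ∀ a b, before a b = true → R a b) (h2 : ∀ a b, before a b = false → R b a)
    (x : α) (ys : List α) (hys : ys.Pairwise R) :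
    (PySem.List.insertBy before x ys).Pairwise R := by
  induction ys with
  | nil => simp [PySem.List.insertBy]
  | cons y ys ih =>
    rw [List.pairwise_cons] at hys
    show List.Pairwise R (if before x y then x :: y :: ys else y :: PySem.List.insertBy before x ys)
    by_cases hb : before x y = true
    · rw [if_pos hb]
      refine List.pairwise_cons.mpr ⟨?_, List.pairwise_cons.mpr hys⟩
      intro z hz
      rcases List.mem_cons.mp hz with rfl | hz
      · exact h1 _ _ hb
      · exact htrans _ _ _ (h1 _ _ hb) (hys.1 _ hz)
    · rw [if_neg hb]
      refine List.pairwise_cons.mpr ⟨?_, ih hys.2⟩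
      intro z hz
      rcases (PySem.List.mem_insertBy _ _ _ _).mp hz with rfl | hz
      · exact h2 _ _ (by simpa using hb)
      · exact hys.1 _ hz

theorem pv_before_true (a b : Int × Int)
    (h : (decide (a.2 < b.2) || (!decide (b.2 < a.2) && decide (a.1 < b.1))) = true) :
    pvR a b := by
  simp only [Bool.or_eq_true, Bool.and_eq_true, Bool.not_eq_true', decide_eq_true_eq,
    decide_eq_false_iff_not] at h
  unfold pvR; omega

theorem pv_before_false (a b : Int × Int)
    (h : (decide (a.2 < b.2) || (!decide (b.2 < a.2) && decide (a.1 < b.1))) = false) :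
    pvR b a := by
  unfold pvR
  by_cases h1 : a.2 < b.2
  · simp [h1] at h
  · by_cases h2 : b.2 < a.2
    · exact Or.inl h2
    · by_cases h3 : a.1 < b.1
      · simp [h1, h2, h3] at h
      · right; omega

theorem pv_sorted2_pairwise (l : List (Int × Int)) :
    (PySem.List.sorted2 l (fun p => p.2) (fun p => p.1) false).Pairwise pvR := by
  show (l.foldl (fun acc x => PySem.List.insertBy
    (fun a b => decide (a.2 < b.2) || (!decide (b.2 < a.2) && decide (a.1 < b.1))) x acc)
    []).Pairwise pvR
  generalize hacc : ([] : List (Int × Int)) = acc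
  have hpacc : acc.Pairwise pvR := by rw [← hacc]; exact List.Pairwise.nil
  clear hacc
  induction l generalizing acc with
  | nil => exact hpacc
  | cons p l ih =>
    exact ih _ (pv_insertBy_pairwise pvR _
      (by rintro a b c (h | ⟨h, h'⟩) (g | ⟨g, g'⟩) <;> unfold pvR <;> omega)
      pv_before_true pv_before_false _ _ hpacc)

theorem pv_groups : ∀ (n : Nat) (s : List (Int × Int)), s.length ≤ n → s.Pairwise pvR →
    ∀ (l : List (Int × Int)), s.Perm l → pvAltGroups s = pvCanon l := by
  intro n
  induction n with
  | zero =>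
    intro s hs _ l hperm
    have : s = [] := List.eq_nil_of_length_eq_zero (Nat.le_zero.mp hs)
    subst this
    have : l = [] := hperm.symm.eq_nil
    subst this
    simp [pvAltGroups, pvCanon, PySem.Set.ofList_nil, PySem.List.sorted]
  | succ n ih =>
    intro s hs hp l hperm
    match s with
    | [] =>
      have : l = [] := hperm.symm.eq_nil
      subst this
      simp [pvAltGroups, pvCanon, PySem.Set.ofList_nil, PySem.List.sorted]
    | (m, y) :: rest =>
      rw [List.pairwise_cons] at hp
      -- names for the run and the remainder
      have hsplit : rest.takeWhile (fun p => p.2 == y) ++ rest.dropWhile (fun p => p.2 == y) = rest :=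
        List.takeWhile_append_dropWhile
      have hgrp : ∀ p ∈ rest.takeWhile (fun p : Int × Int => p.2 == y), p.2 = y := by
        intro p hpmem
        simpa using List.mem_takeWhile_imp hpmem
      have hdropgt : ∀ p ∈ rest.dropWhile (fun p : Int × Int => p.2 == y), y < p.2 := by
        cases hdk : rest.dropWhile (fun p : Int × Int => p.2 == y) with
        | nil => intro p hpmem; simp at hpmem
        | cons d0 dt =>
          have hd0f : (d0.2 == y) = false := by
            have hne : rest.dropWhile (fun p : Int × Int => p.2 == y) ≠ [] := by simp [hdk]
            have h := List.head_dropWhile_not (fun p : Int × Int => p.2 == y) hne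
            simp only [hdk, List.head_cons] at h
            simpa using h
          have hd0rest : d0 ∈ rest := (List.dropWhile_sublist _).mem (by rw [hdk]; exact List.mem_cons_self)
          have hyd0 : y < d0.2 := by
            have := hp.1 _ hd0rest
            rcases this with h | ⟨h, _⟩
            · exact h
            · exact absurd h.symm (by simpa using hd0f)
          have hdt : List.Pairwise pvR (d0 :: dt) := by
            rw [← hdk]; exact (List.Pairwise.sublist (List.dropWhile_sublist _) hp.2)
          intro p hpmem
          rcases List.mem_cons.mp hpmem with rfl | hpmem
          · exact hyd0
          · have := (List.pairwise_cons.mp hdt).1 _ hpmem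
            rcases this with h | ⟨h, _⟩ <;> omega
      have hdropne : ∀ p ∈ rest.dropWhile (fun p : Int × Int => p.2 == y), (p.2 == y) = false := by
        intro p hpmem
        have := hdropgt p hpmem
        simp only [beq_eq_false_iff_ne, ne_eq]; omega
      -- the filter of s at year y is the leading run
      have hfilY : ((m, y) :: rest).filter (fun p => p.2 == y)
          = (m, y) :: rest.takeWhile (fun p : Int × Int => p.2 == y) := by
        rw [← hsplit]
        simp only [List.filter_cons, List.filter_append]
        rw [List.filter_eq_self.mpr (fun p hpmem => by simp [hgrp p hpmem]),
            List.filter_eq_nil_iff.mpr (fun p hpmem => by simp [hdropne p hpmem])]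
        simp
      -- the filter of s at any other year is the filter of the remainder
      have hfilNe : ∀ y' : Int, y' ≠ y → ((m, y) :: rest).filter (fun p => p.2 == y')
          = (rest.dropWhile (fun p : Int × Int => p.2 == y)).filter (fun p => p.2 == y') := by
        intro y' hne
        rw [← hsplit]
        simp only [List.filter_cons, List.filter_append]
        rw [List.filter_eq_nil_iff.mpr (fun p hpmem => by simp [hgrp p hpmem, Ne.symm hne])]
        simp [Ne.symm hne]
      -- years: the sorted distinct years of l are y followed by those of the remainder
      have hyears : PySem.List.sorted (PySem.Set.ofList (l.map (·.2))) (fun x => x) false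
          = y :: PySem.List.sorted
              (PySem.Set.ofList ((rest.dropWhile (fun p : Int × Int => p.2 == y)).map (·.2)))
              (fun x => x) false := by
        apply PySem.List.sorted_eq_of_perm_of_pairwise_lt
        · -- permutation, via nodup + same membership
          have hnodupL : (PySem.Set.ofList (l.map (·.2)) : List Int).Nodup := PySem.Set.nodup_ofList _
          have hnodupD : (PySem.List.sorted
              (PySem.Set.ofList ((rest.dropWhile (fun p : Int × Int => p.2 == y)).map (·.2)))
              (fun x => x) false).Nodup :=
            (PySem.List.sorted_perm _ _ _).nodup_iff.mpr (PySem.Set.nodup_ofList _)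
          have hymem : y ∉ PySem.List.sorted
              (PySem.Set.ofList ((rest.dropWhile (fun p : Int × Int => p.2 == y)).map (·.2)))
              (fun x => x) false := by
            rw [PySem.List.mem_sorted, PySem.Set.mem_ofList]
            intro hmem
            rcases List.mem_map.mp hmem with ⟨p, hpmem, hpy⟩
            have := hdropgt p hpmem; omega
          refine (List.perm_ext_iff_of_nodup (List.nodup_cons.mpr ⟨hymem, hnodupD⟩) hnodupL).mpr ?_
          intro z
          rw [List.mem_cons, PySem.List.mem_sorted, PySem.Set.mem_ofList, PySem.Set.mem_ofList,
              ← hperm.map (·.2) |>.mem_iff]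
          constructor
          · rintro (rfl | hz)
            · exact List.mem_map.mpr ⟨(m, z), List.mem_cons_self, rfl⟩
            · rcases List.mem_map.mp hz with ⟨p, hpmem, rfl⟩
              exact List.mem_map.mpr ⟨p, List.mem_cons_of_mem _
                (by rw [← hsplit]; exact List.mem_append_right _ hpmem), rfl⟩
          · intro hz
            rcases List.mem_map.mp hz with ⟨p, hpmem, rfl⟩
            rcases List.mem_cons.mp hpmem with rfl | hpmem
            · exact Or.inl rfl
            · rw [← hsplit] at hpmem
              rcases List.mem_append.mp hpmem with hpmem | hpmem
              · exact Or.inl (hgrp p hpmem)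
              · exact Or.inr (List.mem_map.mpr ⟨p, hpmem, rfl⟩)
        · -- strictly increasing
          refine List.pairwise_cons.mpr ⟨?_, PySem.List.sorted_ofList_pairwise_lt _⟩
          intro z hz
          rw [PySem.List.mem_sorted, PySem.Set.mem_ofList] at hz
          rcases List.mem_map.mp hz with ⟨p, hpmem, rfl⟩
          exact hdropgt p hpmem
      -- the months of year y, already in order
      have hrunPairwise : List.Pairwise (fun a b : Int => a ≤ b)
          (m :: (rest.takeWhile (fun p : Int × Int => p.2 == y)).map (·.1)) := by
        have hsub : ((m, y) :: rest.takeWhile (fun p : Int × Int => p.2 == y)).Sublist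
            ((m, y) :: rest) := List.Sublist.cons₂ _ (List.takeWhile_sublist _)
        have hpw : List.Pairwise pvR ((m, y) :: rest.takeWhile (fun p : Int × Int => p.2 == y)) :=
          List.Pairwise.sublist hsub (List.pairwise_cons.mpr hp)
        have hall : ∀ p ∈ (m, y) :: rest.takeWhile (fun p : Int × Int => p.2 == y), p.2 = y := by
          intro p hpmem
          rcases List.mem_cons.mp hpmem with rfl | hpmem
          · rfl
          · exact hgrp p hpmem
        have : List.Pairwise (fun a b : Int × Int => a.1 ≤ b.1)
            ((m, y) :: rest.takeWhile (fun p : Int × Int => p.2 == y)) := by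
          refine hpw.imp_of_mem ?_
          intro a b ha hb hab
          have h2a := hall a ha
          have h2b := hall b hb
          rcases hab with h | ⟨_, h⟩ <;> omega
        simpa using List.Pairwise.map (fun p : Int × Int => p.1) (fun a b h => h) this
      have hmonthsY : PySem.List.sorted ((l.filter (fun p => p.2 == y)).map (·.1)) (fun x => x) false
          = m :: (rest.takeWhile (fun p : Int × Int => p.2 == y)).map (·.1) := by
        rw [PySem.List.sorted_eq_sorted_of_perm _ _ _ (fun a b h => h)
          (((hperm.symm.filter _).map (·.1) : _))]
        rw [hfilY]
        exact PySem.List.sorted_eq_self_of_pairwise _ _ (by simpa using hrunPairwise)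
      -- assemble
      rw [pvAltGroups, pvCanon, hyears, List.map_cons, hmonthsY]
      congr 1
      have htail : pvAltGroups (rest.dropWhile (fun p : Int × Int => p.2 == y))
          = pvCanon (rest.dropWhile (fun p : Int × Int => p.2 == y)) := by
        refine ih _ ?_ (List.Pairwise.sublist (List.dropWhile_sublist _) hp.2) _ (List.Perm.refl _)
        have h1 := List.length_dropWhile_le (fun p : Int × Int => p.2 == y) rest
        simp only [List.length_cons] at hs
        omega
      rw [htail, pvCanon]
      refine List.map_eq_map_iff.mpr ?_
      intro y' hy'
      have hy'mem : y' ∈ (rest.dropWhile (fun p : Int × Int => p.2 == y)).map (·.2) := by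
        rw [PySem.List.mem_sorted, PySem.Set.mem_ofList] at hy'
        exact hy'
      have hy'ne : y' ≠ y := by
        rcases List.mem_map.mp hy'mem with ⟨p, hpmem, rfl⟩
        have := hdropgt p hpmem; omega
      congr 1
      rw [PySem.List.sorted_eq_sorted_of_perm _ _ _ (fun a b h => h)
        (((hperm.symm.filter _).map (·.1) : _))]
      rw [hfilNe y' hy'ne]

theorem pv_B_canon (l : List (Int × Int)) :
    dax_date_filter_py_alt l = PySem.Str.join " || " (pvCanon l) := by
  unfold dax_date_filter_py_alt
  rw [pv_groups (PySem.List.sorted2 l (fun p => p.2) (fun p => p.1) false).length _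
    (Nat.le_refl _) (pv_sorted2_pairwise l) l (PySem.List.sorted2_perm _ _ _ _)]

-- ===== VERDICT (by name: the statement is the Claim_ definition above) =====
theorem dax_date_filter_py_spec : Claim_equal_dax_date_filter_py := by
  intro l _
  show _ = _
  rw [pv_A_canon, pv_B_canon]
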